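-- pv_equiv track=rewrite | github.com/Marina963/Practica_Heuristica_2 | Parte_2/Ambulance.py | dist_manhattan
-- ===== SOURCE A (Python) =====
-- import math
--
-- def dist_manhattan(src, lista) -> int:
-- 	"""Función que devuelve la distancia Manhattan mínima entre el estado y una lista de posiciones"""
-- 	minimo = math.inf
-- 	pos = []
-- 	for i in range(len(lista)):
-- 		dist = abs(int(src[0]) - int(lista[i][0])) + abs(int(src[1]) - int(lista[i][1]))
-- 		if dist < minimo:
-- 			minimo = dist
-- 			pos = lista[i].copy()
-- 	return minimo, pos
-- ===== SOURCE B (Python) =====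
-- import math
--
-- def dist_manhattan(src, lista) -> int:
--     """Minimum Manhattan distance to any position in lista, with that position.
--
--     Sort-based strategy: stably sort the candidate indices by their Manhattan
--     distance to src; the head of the sorted order is the first index attaining
--     the minimum (Python's sort is stable, matching A's strict-< tie-break)."""
--     if not lista:
--         return math.inf, []
--     def key(k):
--         p = lista[k]
--         return abs(int(src[0]) - int(p[0])) + abs(int(src[1]) - int(p[1]))
--     i = sorted(range(len(lista)), key=key)[0]
--     return key(i), lista[i].copy()
-- ===== Notes on version B (the rewrite author's own statement) =====
-- stated objective: alternative
-- what changed: Replaced A's single-pass running-minimum accumulator loop by a sort-based algorithm: stably sort the candidate indices by Manhattan distance and take the head of the sorted order, which is the first minimal index (stability reproduces A's strict-< tie-break).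
-- outside the precondition, e.g. on dist_manhattan([0, 0], []): A returns (inf, []), B returns (inf, [])
import Mathlib
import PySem

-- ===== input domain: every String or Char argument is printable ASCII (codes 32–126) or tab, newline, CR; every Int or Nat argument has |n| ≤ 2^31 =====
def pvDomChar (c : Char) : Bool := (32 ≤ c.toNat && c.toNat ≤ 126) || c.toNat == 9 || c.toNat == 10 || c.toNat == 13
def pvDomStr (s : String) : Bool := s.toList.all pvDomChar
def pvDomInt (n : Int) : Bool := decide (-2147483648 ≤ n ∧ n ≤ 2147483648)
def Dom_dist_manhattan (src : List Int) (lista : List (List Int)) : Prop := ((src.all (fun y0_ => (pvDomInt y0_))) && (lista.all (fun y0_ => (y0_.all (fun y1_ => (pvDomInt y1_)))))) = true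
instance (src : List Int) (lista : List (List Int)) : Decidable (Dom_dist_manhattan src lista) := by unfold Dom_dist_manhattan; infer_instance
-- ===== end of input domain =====

-- B replaces A's single-pass running-minimum loop by a sort-based algorithm (stably sort
-- the candidate indices by distance, answer is the head); equivalence of the RETURN value
-- is what is proved (lista[i].copy() has no observable effect here since nothing is mutated).

-- Manhattan distance of one row to src: abs(int(src[0])-int(row[0])) + abs(int(src[1])-int(row[1]))
-- (shared by both ports; int() on an int is the identity; indices in range under Pre_)
def pvDist (src row : List Int) : Int :=
  |PySem.List.pyGetD src 0 0 - PySem.List.pyGetD row 0 0| +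
  |PySem.List.pyGetD src 1 0 - PySem.List.pyGetD row 1 0|

-- ===== PORT A =====
-- for-loop over range(len(lista)) with running (minimo, pos); minimo starts at math.inf,
-- modelled as `none` (any dist < inf, so the first iteration always updates).
def dist_manhattan (src : List Int) (lista : List (List Int)) : Int × List Int :=
  let r := (PySem.List.pyRange 0 (lista.length : Int)).foldl
    (fun (st : Option Int × List Int) i =>
      let row := PySem.List.pyGetD lista i []
      let dist := pvDist src row
      match st.1 with
      | none => (some dist, row)
      | some m => if dist < m then (some dist, row) else st)
    (none, [])
  (r.1.getD 0, r.2)   -- under Pre_ the list is nonempty, so r.1 = some minimo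

-- ===== PORT B =====
def dist_manhattan_alt (src : List Int) (lista : List (List Int)) : Int × List Int :=
  if lista.isEmpty then (0, [])   -- Source B returns (math.inf, []) here; inf is not an Int — excluded by Pre_
  else
    let key := fun (k : Int) => pvDist src (PySem.List.pyGetD lista k [])
    match (PySem.List.sorted (PySem.List.pyRange 0 (lista.length : Int)) key).head? with
    | some i => (key i, PySem.List.pyGetD lista i [])
    | none => (0, [])   -- unreachable: sorting a nonempty range gives a nonempty list

-- ===== PRECONDITION & SPEC =====
-- Pre_ excludes (a) empty lista, on which A returns (math.inf, []) — math.inf is a float,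
-- not a value of the declared int type — and (b) src or a row of lista shorter than 2,
-- on which A raises IndexError.
def Pre_dist_manhattan (src : List Int) (lista : List (List Int)) : Prop :=
  lista ≠ [] ∧ 2 ≤ src.length ∧ ∀ row ∈ lista, 2 ≤ row.length
instance (src : List Int) (lista : List (List Int)) : Decidable (Pre_dist_manhattan src lista) := by unfold Pre_dist_manhattan; infer_instance

def pvWitness_dist_manhattan : List Int × List (List Int) := ([1, 2], [[3, 4], [0, 2], [5, 1]])

def Spec_dist_manhattan (src : List Int) (lista : List (List Int)) (out : Int × List Int) : Prop := out = dist_manhattan_alt src lista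
instance (src : List Int) (lista : List (List Int)) (out : Int × List Int) : Decidable (Spec_dist_manhattan src lista out) := by unfold Spec_dist_manhattan; infer_instance

-- ===== CLAIM (what is proved, stated in full; the proofs are below) =====
def Claim_equal_dist_manhattan : Prop := ∀ (src : List Int) (lista : List (List Int)), Dom_dist_manhattan src lista → Pre_dist_manhattan src lista → Spec_dist_manhattan src lista (dist_manhattan src lista)

-- ===== LEMMAS AND PROOFS =====

theorem pvGetD_append_left {α : Type} (a b : List α) {i : Int} (d : α)
    (h0 : 0 ≤ i) (h1 : i < (a.length : Int)) :
    PySem.List.pyGetD (a ++ b) i d = PySem.List.pyGetD a i d := by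
  rw [PySem.List.pyGetD_eq_getElem (a ++ b) d h0 (by simp; omega),
      PySem.List.pyGetD_eq_getElem a d h0 h1]
  rw [List.getElem_append_left (by omega)]

theorem pvGetD_append_last {α : Type} (a : List α) (x : α) (d : α) :
    PySem.List.pyGetD (a ++ [x]) (a.length : Int) d = x := by
  rw [PySem.List.pyGetD_eq_getElem (a ++ [x]) d (by positivity) (by simp)]
  simp

theorem pv_min?_append_singleton {α κ : Type} [LT κ] [DecidableLT κ]
    (l : List α) (a : α) (k : α → κ) :
    PySem.List.min? (l ++ [a]) k =
      match PySem.List.min? l k with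
      | none => some a
      | some mm => if k a < k mm then some a else some mm := by
  unfold PySem.List.min?
  rw [List.foldl_append]
  rfl

theorem pv_min?_congr {α κ : Type} [LT κ] [DecidableLT κ]
    (l : List α) (k1 k2 : α → κ) (h : ∀ j ∈ l, k1 j = k2 j) :
    PySem.List.min? l k1 = PySem.List.min? l k2 := by
  induction l using List.reverseRecOn with
  | nil => rfl
  | append_singleton t a ih =>
    have ht : PySem.List.min? t k1 = PySem.List.min? t k2 :=
      ih (fun j hj => h j (List.mem_append_left _ hj))
    rw [pv_min?_append_singleton, pv_min?_append_singleton, ht]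
    have ha : k1 a = k2 a := h a (by simp)
    cases hmm : PySem.List.min? t k2 with
    | none => simp
    | some mm =>
      have : k1 mm = k2 mm := h mm (List.mem_append_left _ (PySem.List.min?_mem hmm))
      simp [ha, this]

-- stable insertion sort grows from the right by a single ordered insertion
theorem pv_sorted_append_singleton {α κ : Type} [LT κ] [DecidableLT κ]
    (t : List α) (a : α) (key : α → κ) :
    PySem.List.sorted (t ++ [a]) key =
      PySem.List.insertBy (fun p q => decide (key p < key q)) a (PySem.List.sorted t key) := by
  rw [PySem.List.sorted_eq_foldl_insertBy, PySem.List.sorted_eq_foldl_insertBy, List.foldl_append]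
  rfl

-- the head of the stable sort IS the first minimal element (B's argmin = A's running min)
theorem pv_min?_eq_head_sorted {α κ : Type} [LT κ] [DecidableLT κ]
    (xs : List α) (key : α → κ) :
    PySem.List.min? xs key = (PySem.List.sorted xs key).head? := by
  induction xs using List.reverseRecOn with
  | nil => rfl
  | append_singleton t a ih =>
    rw [pv_min?_append_singleton, pv_sorted_append_singleton, ih]
    cases h : PySem.List.sorted t key with
    | nil => simp [PySem.List.insertBy]
    | cons m r =>
      by_cases hc : key a < key m
      · simp [PySem.List.insertBy, hc]
      · simp [PySem.List.insertBy, hc]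

theorem pvMain (src : List Int) (lista : List (List Int)) (h : lista ≠ []) :
    ∃ i : Int, 0 ≤ i ∧ i < (lista.length : Int) ∧
      PySem.List.min? (PySem.List.pyRange 0 (lista.length : Int))
        (fun k => pvDist src (PySem.List.pyGetD lista k [])) = some i ∧
      lista.foldl
        (fun (st : Option Int × List Int) row =>
          match st.1 with
          | none => (some (pvDist src row), row)
          | some m => if pvDist src row < m then (some (pvDist src row), row) else st)
        (none, []) =
        (some (pvDist src (PySem.List.pyGetD lista i [])), PySem.List.pyGetD lista i []) := by
  induction lista using List.reverseRecOn with
  | nil => exact absurd rfl h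
  | append_singleton m x ih =>
    rcases eq_or_ne m [] with rfl | hm
    · have hr : PySem.List.pyRange (0:Int) 1 = [0] := by decide
      refine ⟨0, le_rfl, by simp, ?_, ?_⟩
      · show PySem.List.min? (PySem.List.pyRange 0 1) _ = some 0
        rw [hr]
        simp [PySem.List.min?]
      · simp [PySem.List.pyGetD, PySem.List.pyGet?, PySem.List.pyIdx?]
    · obtain ⟨i, hi0, hin, hmin, hfold⟩ := ih hm
      have hlen : (((m ++ [x]).length : Nat) : Int) = (m.length : Int) + 1 := by simp
      have hkey_i : PySem.List.pyGetD (m ++ [x]) i [] = PySem.List.pyGetD m i [] :=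
        pvGetD_append_left _ _ _ hi0 hin
      have hkey_n : PySem.List.pyGetD (m ++ [x]) (m.length : Int) [] = x :=
        pvGetD_append_last _ _ _
      have hstep : PySem.List.min? (PySem.List.pyRange 0 (((m ++ [x]).length : Nat) : Int))
          (fun k => pvDist src (PySem.List.pyGetD (m ++ [x]) k []))
          = if pvDist src x < pvDist src (PySem.List.pyGetD m i [])
            then some (m.length : Int) else some i := by
        rw [hlen, PySem.List.pyRange_one_succ_right (by positivity),
            pv_min?_append_singleton]
        have hcongr : PySem.List.min? (PySem.List.pyRange 0 (m.length : Int))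
            (fun k => pvDist src (PySem.List.pyGetD (m ++ [x]) k []))
            = some i := by
          rw [pv_min?_congr _ _ (fun k => pvDist src (PySem.List.pyGetD m k []))
            (fun j hj => by
              obtain ⟨hj0, hj1⟩ := PySem.List.mem_pyRange_one.mp hj
              rw [pvGetD_append_left _ _ _ hj0 hj1])]
          exact hmin
        rw [hcongr]
        simp only [hkey_n, hkey_i]
      have hfoldx : (m ++ [x]).foldl
          (fun (st : Option Int × List Int) row =>
            match st.1 with
            | none => (some (pvDist src row), row)
            | some mm => if pvDist src row < mm then (some (pvDist src row), row) else st)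
          (none, []) =
          if pvDist src x < pvDist src (PySem.List.pyGetD m i [])
          then (some (pvDist src x), x)
          else (some (pvDist src (PySem.List.pyGetD m i [])), PySem.List.pyGetD m i []) := by
        rw [List.foldl_append, hfold]
        simp [List.foldl]
      by_cases hc : pvDist src x < pvDist src (PySem.List.pyGetD m i [])
      · refine ⟨(m.length : Int), by positivity, by rw [hlen]; omega, ?_, ?_⟩
        · rw [hstep]; simp [hc]
        · rw [hfoldx, hkey_n]
          simp [hc]
      · refine ⟨i, hi0, by rw [hlen]; omega, ?_, ?_⟩
        · rw [hstep]; simp [hc]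
        · rw [hfoldx, hkey_i]
          simp [hc]

-- A's indexed fold equals the structural fold over lista
theorem pvFoldA (src : List Int) (lista : List (List Int)) :
    (PySem.List.pyRange 0 (lista.length : Int)).foldl
      (fun (st : Option Int × List Int) i =>
        let row := PySem.List.pyGetD lista i []
        let dist := pvDist src row
        match st.1 with
        | none => (some dist, row)
        | some m => if dist < m then (some dist, row) else st)
      (none, []) =
    lista.foldl
      (fun (st : Option Int × List Int) row =>
        match st.1 with
        | none => (some (pvDist src row), row)
        | some m => if pvDist src row < m then (some (pvDist src row), row) else st)
      (none, []) := by
  have := PySem.List.foldl_pyRange_pyGetD lista []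
    (fun (st : Option Int × List Int) row =>
      match st.1 with
      | none => (some (pvDist src row), row)
      | some m => if pvDist src row < m then (some (pvDist src row), row) else st)
    (none, []) (a := 0) le_rfl
  simpa [PySem.List.len] using this

-- ===== VERDICT (by name: the statement is the Claim_ definition above) =====
theorem dist_manhattan_spec : Claim_equal_dist_manhattan := by
  intro src lista _hdom hpre
  obtain ⟨hne, _hsrc, _hrows⟩ := hpre
  obtain ⟨i, _hi0, _hin, hmin, hfold⟩ := pvMain src lista hne
  unfold Spec_dist_manhattan dist_manhattan dist_manhattan_alt
  rw [pvFoldA, hfold]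
  simp only [← pv_min?_eq_head_sorted, hmin, List.isEmpty_iff]
  simp [hne]
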